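-- pv_equiv track=rewrite | github.com/Sonok/ZPrep | 13_recent_questions/solutions.py | min_allocation_cost
-- ===== SOURCE A (Python) =====
-- import bisect
--
-- def min_allocation_cost(instances: list[int], tasks: list[int]) -> int:
--     available = sorted(instances)
--     tasks_sorted = sorted(tasks)
--     total_cost = 0
--
--     for task in tasks_sorted:
--         idx = bisect.bisect_left(available, task)
--         if idx == len(available):
--             return -1  # no instance big enough
--         total_cost += available[idx]
--         available.pop(idx)
--
--     return total_cost
-- ===== SOURCE B (Python) =====
-- def min_allocation_cost(instances: list[int], tasks: list[int]) -> int: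
--     # Dual greedy: iterate once over the sorted INSTANCES (not the tasks),
--     # assigning each instance to the smallest still-unserved task it fits;
--     # a task index replaces A's bisect + O(n) pop on a shrinking list.
--     ts = sorted(tasks)
--     m = len(ts)
--     total = 0
--     j = 0
--     for a in sorted(instances):
--         if j < m and a >= ts[j]:
--             total += a
--             j += 1
--     return total if j == m else -1
-- ===== Notes on version B (the rewrite author's own statement) =====
-- stated objective: faster
-- what changed: Inverts the greedy: instead of A's per-task bisect + O(n) pop on a shrinking sorted list, B makes one pass over the sorted instances, assigning each instance to the smallest still-unserved task via an advancing task index.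
import Mathlib
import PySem

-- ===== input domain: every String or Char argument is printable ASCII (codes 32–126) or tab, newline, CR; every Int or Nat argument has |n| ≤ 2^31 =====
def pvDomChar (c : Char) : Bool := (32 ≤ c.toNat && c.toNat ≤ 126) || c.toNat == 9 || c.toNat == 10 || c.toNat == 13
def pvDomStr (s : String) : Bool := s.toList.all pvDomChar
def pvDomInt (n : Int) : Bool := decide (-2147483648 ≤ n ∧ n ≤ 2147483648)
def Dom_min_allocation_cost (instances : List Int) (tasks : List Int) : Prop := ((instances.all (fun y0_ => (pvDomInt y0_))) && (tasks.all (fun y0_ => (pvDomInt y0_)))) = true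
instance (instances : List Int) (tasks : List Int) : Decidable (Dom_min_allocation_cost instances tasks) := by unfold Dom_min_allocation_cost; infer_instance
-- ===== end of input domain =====

-- ===== PORT A =====
-- B inverts the greedy: one fold over the sorted instances with a task index,
-- instead of A's per-task bisect + pop (objective: faster, no O(n) deletions).
-- A's loop: for each task (ascending), bisect_left into the remaining sorted
-- `available`, return -1 if past the end, else add that instance and pop it.
def pvLoopA (avail : List Int) (tasks : List Int) (total : Int) : Int :=
  match tasks with
  | [] => total
  | t :: ts =>
    let idx := PySem.List.bisectLeft avail t
    if idx = avail.length then -1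
    else pvLoopA (avail.eraseIdx idx) ts (total + avail.getD idx 0)
      -- `avail[idx]` is in range here: idx ≤ len (bisect) and idx ≠ len

def min_allocation_cost (instances : List Int) (tasks : List Int) : Int :=
  pvLoopA (PySem.List.sorted instances (fun x => x)) (PySem.List.sorted tasks (fun x => x)) 0

-- ===== PORT B =====
-- Source B's single `for a in sorted(instances)` with state (total, j) is a foldl;
-- `ts[j]` is guarded by `j < m`, so getD's default is never read.
def min_allocation_cost_alt (instances : List Int) (tasks : List Int) : Int :=
  let ts := PySem.List.sorted tasks (fun x => x)
  let m := ts.length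
  let st := (PySem.List.sorted instances (fun x => x)).foldl
    (fun (st : Int × Nat) a =>
      if st.2 < m ∧ ts.getD st.2 0 ≤ a then (st.1 + a, st.2 + 1) else st)
    (0, 0)
  if st.2 = m then st.1 else -1

-- ===== PRECONDITION & SPEC =====
def Spec_min_allocation_cost (instances : List Int) (tasks : List Int) (out : Int) : Prop := out = min_allocation_cost_alt instances tasks
instance (instances : List Int) (tasks : List Int) (out : Int) : Decidable (Spec_min_allocation_cost instances tasks out) := by unfold Spec_min_allocation_cost; infer_instance

-- ===== CLAIM (what is proved, stated in full; the proofs are below) =====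
def Claim_equal_min_allocation_cost : Prop := ∀ (instances : List Int) (tasks : List Int), Dom_min_allocation_cost instances tasks → Spec_min_allocation_cost instances tasks (min_allocation_cost instances tasks)

-- ===== LEMMAS AND PROOFS =====

-- Proof-side middle form: a merge walk over avail with the pending tasks as a list.
def pvLoopC (avail : List Int) (pending : List Int) (total : Int) : Int :=
  match avail, pending with
  | _, [] => total
  | [], _ :: _ => -1
  | a :: as_, t :: ts => if a < t then pvLoopC as_ (t :: ts) total else pvLoopC as_ ts (total + a)

-- Proof-side: A's loop rephrased with dropWhile (skip-all-smaller, take head).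
def pvLoopB (avail : List Int) (tasks : List Int) (total : Int) : Int :=
  match tasks with
  | [] => total
  | t :: ts =>
    match avail.dropWhile (fun a => decide (a < t)) with
    | [] => -1
    | x :: rest => pvLoopB rest ts (total + x)

-- On a (≤)-sorted list, bisect_left is the length of the `< x` prefix.
theorem pv_bisect_eq_takeWhile (xs : List Int) (x : Int)
    (hs : List.Pairwise (· ≤ ·) xs) :
    PySem.List.bisectLeft xs x = (xs.takeWhile (fun a => decide (a < x))).length := by
  obtain ⟨h1, h2, h3⟩ := PySem.List.bisectLeft_spec xs x hs
  set q : Int → Bool := fun a => decide (a < x) with hq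
  set i := PySem.List.bisectLeft xs x
  have htwle : (xs.takeWhile q).length ≤ xs.length := (List.takeWhile_prefix q).length_le
  rcases Nat.lt_trichotomy i (xs.takeWhile q).length with hlt | heq | hgt
  · exfalso
    have hi : i < xs.length := lt_of_lt_of_le hlt htwle
    have hpref := List.takeWhile_prefix (l := xs) q
    have hmem : (xs.takeWhile q)[i]'hlt ∈ xs.takeWhile q := List.getElem_mem hlt
    have hqv : q ((xs.takeWhile q)[i]'hlt) = true := List.mem_takeWhile_imp hmem
    have hgeteq : (xs.takeWhile q)[i]'hlt = xs[i]'hi := hpref.getElem hlt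
    have hxlt : xs[i]'hi < x := by
      have := hqv; rw [hgeteq] at this; simpa [hq] using this
    have := h3 i hi (le_refl i)
    exact absurd (lt_of_le_of_lt this hxlt) (lt_irrefl x)
  · exact heq
  · exfalso
    have hjlen : (xs.takeWhile q).length < xs.length := lt_of_lt_of_le hgt h1
    have hxj : xs[(xs.takeWhile q).length]'hjlen < x := h2 _ hjlen hgt
    have hsplit : xs.takeWhile q ++ xs.dropWhile q = xs := List.takeWhile_append_dropWhile
    cases hdw : xs.dropWhile q with
    | nil =>
      rw [hdw, List.append_nil] at hsplit
      have : (xs.takeWhile q).length = xs.length := by rw [hsplit]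
      omega
    | cons d ds =>
      have e : xs = xs.takeWhile q ++ d :: ds := by conv_lhs => rw [← hsplit, hdw]
      have hq_d : q d = false := by
        have hne : xs.dropWhile q ≠ [] := by simp [hdw]
        have := List.head_dropWhile_not q hne
        simpa [hdw] using this
      have h? : (xs.takeWhile q ++ d :: ds)[(xs.takeWhile q).length]? = some d := by
        rw [List.getElem?_append_right (le_refl _)]
        simp
      rw [← e] at h?
      have hgete : xs[(xs.takeWhile q).length]'hjlen = d := by
        have := List.getElem?_eq_getElem hjlen
        rw [this] at h?
        exact Option.some.inj h?
      rw [hgete] at hxj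
      simp only [hq, decide_eq_false_iff_not] at hq_d
      exact hq_d hxj

theorem pv_eraseIdx_app (p : List Int) (r : List Int) (k : Nat) :
    (p ++ r).eraseIdx (p.length + k) = p ++ r.eraseIdx k := by
  induction p with
  | nil => simp
  | cons a p ih => simp [Nat.succ_add, ih]

theorem pv_getD_app (p : List Int) (r : List Int) (k : Nat) (d : Int) :
    (p ++ r).getD (p.length + k) d = r.getD k d := by
  induction p with
  | nil => simp
  | cons a p ih => simpa [Nat.succ_add] using ih

theorem pv_takeWhile_app (q : Int → Bool) (p r : List Int) (hp : ∀ x ∈ p, q x = true) :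
    (p ++ r).takeWhile q = p ++ r.takeWhile q := by
  induction p with
  | nil => simp
  | cons a p ih =>
    have ha : q a = true := hp a (List.mem_cons_self ..)
    simp [ha, ih (fun x hx => hp x (List.mem_cons_of_mem a hx))]

-- A-loop invariant: with a prefix p of instances each smaller than every pending
-- task, A's bisect+pop loop on p ++ r computes what the dropWhile walk computes on r.
theorem pv_main (ts : List Int) : ∀ (p r : List Int) (total : Int),
    List.Pairwise (· ≤ ·) ts →
    List.Pairwise (· ≤ ·) (p ++ r) →
    (∀ x ∈ p, ∀ t ∈ ts, x < t) →
    pvLoopA (p ++ r) ts total = pvLoopB r ts total := by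
  induction ts with
  | nil => intro p r total _ _ _; simp [pvLoopA, pvLoopB]
  | cons t ts ih =>
    intro p r total hts hpr hplt
    set q : Int → Bool := fun a => decide (a < t) with hq
    have hpq : ∀ x ∈ p, q x = true := by
      intro x hx
      simpa [hq] using hplt x hx t (List.mem_cons_self ..)
    have hbis : PySem.List.bisectLeft (p ++ r) t = p.length + (r.takeWhile q).length := by
      rw [pv_bisect_eq_takeWhile _ _ hpr, pv_takeWhile_app q p r hpq, List.length_append]
    have hsplit : r.takeWhile q ++ r.dropWhile q = r := List.takeWhile_append_dropWhile
    rw [pvLoopA, pvLoopB]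
    cases hdw : r.dropWhile q with
    | nil =>
      have hlen : (r.takeWhile q).length = r.length := by
        conv_rhs => rw [← hsplit]
        simp [hdw]
      rw [hbis, hlen]
      simp
    | cons x rest =>
      have hlen : (r.takeWhile q).length + (x :: rest).length = r.length := by
        conv_rhs => rw [← hsplit]
        simp [hdw]
      have hne : ¬ (p.length + (r.takeWhile q).length = (p ++ r).length) := by
        simp only [List.length_append]
        simp at hlen
        omega
      rw [hbis, if_neg hne]
      have hr : r = r.takeWhile q ++ (x :: rest) := by rw [← hdw, hsplit]
      set tw := r.takeWhile q with htw
      have hgd : (p ++ r).getD (p.length + tw.length) 0 = x := by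
        rw [pv_getD_app]
        conv_lhs => rw [hr]
        rw [← Nat.add_zero tw.length, pv_getD_app tw (x :: rest) 0]
        rfl
      have her : (p ++ r).eraseIdx (p.length + tw.length) = (p ++ tw) ++ rest := by
        rw [pv_eraseIdx_app, List.append_assoc]
        congr 1
        conv_lhs => rw [hr]
        rw [← Nat.add_zero tw.length, pv_eraseIdx_app tw (x :: rest) 0]
        rfl
      rw [hgd, her]
      have htlets : ∀ t' ∈ ts, t ≤ t' := fun t' ht' => List.rel_of_pairwise_cons hts ht'
      have hsub : ((p ++ tw) ++ rest).Sublist (p ++ r) := by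
        have h1 : (tw ++ rest).Sublist (tw ++ x :: rest) :=
          List.Sublist.append_left (List.sublist_cons_self x rest) tw
        have h2 := h1.append_left p
        rw [← List.append_assoc] at h2
        rw [hr]
        exact h2
      exact ih (p ++ tw) rest (total + x) (List.Pairwise.of_cons hts)
        (hpr.sublist hsub)
        (by
          intro y hy t' ht'
          rcases List.mem_append.mp hy with hyp | hytw
          · exact hplt y hyp t' (List.mem_cons_of_mem t ht')
          · have : q y = true := List.mem_takeWhile_imp hytw
            have hylt : y < t := by simpa [hq] using this
            exact lt_of_lt_of_le hylt (htlets t' ht'))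

-- dropWhile walk = merge walk (pure restructuring, no hypotheses needed).
theorem pv_B_eq_C (avail pending : List Int) (total : Int) :
    pvLoopB avail pending total = pvLoopC avail pending total := by
  induction avail generalizing pending total with
  | nil => cases pending <;> simp [pvLoopB, pvLoopC]
  | cons a as_ ih =>
    cases pending with
    | nil => simp [pvLoopB, pvLoopC]
    | cons t ts =>
      by_cases h : a < t
      · rw [pvLoopC, if_pos h]
        rw [show pvLoopB (a :: as_) (t :: ts) total = pvLoopB as_ (t :: ts) total by
          rw [pvLoopB, pvLoopB, List.dropWhile_cons, if_pos (by simpa using h)]]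
        exact ih (t :: ts) total
      · rw [pvLoopC, if_neg h, ← ih]
        rw [pvLoopB, List.dropWhile_cons, if_neg (by simpa using h)]

-- merge walk = B's indexed fold over the instances.
theorem pv_C_eq_fold (avail : List Int) (ts : List Int) :
    ∀ (j : Nat) (total : Int), j ≤ ts.length →
    (let st := avail.foldl
        (fun (st : Int × Nat) a =>
          if st.2 < ts.length ∧ ts.getD st.2 0 ≤ a then (st.1 + a, st.2 + 1) else st)
        (total, j);
     if st.2 = ts.length then st.1 else -1) = pvLoopC avail (ts.drop j) total := by
  induction avail with
  | nil =>
    intro j total hj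
    simp only [List.foldl_nil]
    by_cases h : j = ts.length
    · rw [if_pos h, h, List.drop_length]; rfl
    · rw [if_neg h]
      have : j < ts.length := lt_of_le_of_ne hj h
      obtain ⟨t, rest, hdrop⟩ : ∃ t rest, ts.drop j = t :: rest := by
        cases hd : ts.drop j with
        | nil => exfalso; have := List.drop_eq_nil_iff.mp hd; omega
        | cons t rest => exact ⟨t, rest, rfl⟩
      rw [hdrop]; rfl
  | cons a as_ ih =>
    intro j total hj
    simp only [List.foldl_cons]
    by_cases hjlt : j < ts.length
    · have hget : ts.getD j 0 = ts[j]'hjlt := by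
        simp [List.getD, List.getElem?_eq_getElem hjlt]
      have hdrop : ts.drop j = ts[j]'hjlt :: ts.drop (j + 1) :=
        List.drop_eq_getElem_cons hjlt
      by_cases hle : ts.getD j 0 ≤ a
      · rw [if_pos (show j < ts.length ∧ ts.getD j 0 ≤ a from ⟨hjlt, hle⟩),
          hdrop, pvLoopC, if_neg (show ¬ a < ts[j]'hjlt by rw [hget] at hle; omega)]
        exact ih (j + 1) (total + a) hjlt
      · rw [if_neg (show ¬ (j < ts.length ∧ ts.getD j 0 ≤ a) from fun hc => hle hc.2),
          hdrop, pvLoopC, if_pos (show a < ts[j]'hjlt by rw [hget] at hle; omega), ← hdrop]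
        exact ih j total hj
    · have hnil : ts.drop j = [] := by
        rw [le_antisymm hj (not_lt.mp hjlt), List.drop_length]
      rw [if_neg (show ¬ (j < ts.length ∧ ts.getD j 0 ≤ a) from fun hc => hjlt hc.1), hnil]
      have := ih j total hj
      rw [hnil] at this
      rw [this]
      cases as_ <;> rfl

-- ===== VERDICT (by name: the statement is the Claim_ definition above) =====
theorem min_allocation_cost_spec : Claim_equal_min_allocation_cost := by
  intro instances tasks _
  unfold Spec_min_allocation_cost min_allocation_cost min_allocation_cost_alt
  have h1 := pv_main (PySem.List.sorted tasks (fun x => x)) []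
    (PySem.List.sorted instances (fun x => x)) 0
    (PySem.List.sorted_pairwise tasks (fun x => x))
    (by simpa using PySem.List.sorted_pairwise instances (fun x => x))
    (by intro x hx; simp at hx)
  have h2 := pv_B_eq_C (PySem.List.sorted instances (fun x => x))
    (PySem.List.sorted tasks (fun x => x)) 0
  have h3 := pv_C_eq_fold (PySem.List.sorted instances (fun x => x))
    (PySem.List.sorted tasks (fun x => x)) 0 0 (Nat.zero_le _)
  simp only [List.drop_zero] at h3
  simp only [List.nil_append] at h1
  rw [h1, h2, ← h3]
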